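-- pv_equiv track=rewrite | github.com/stevekrenzel/advent_of_code_2021 | day23/main.py | is_room_packed_tight
-- ===== SOURCE A (Python) =====
-- def is_occupied(position, positions):
--     return position in positions
--
-- def is_room_packed_tight(species, positions, rooms):
--     room = rooms[species]
--
--     validating = False
--     for spot in sorted(room):
--         if is_occupied(spot, positions):
--             validating = True
--
--         if not validating:
--             continue
--
--         if not is_occupied(spot, positions):
--             return False
--
--         if positions[spot] != species:
--             return False
--
--     return True
-- ===== SOURCE B (Python) =====
-- def is_room_packed_tight(species, positions, rooms):
--     spots = sorted(rooms[species])
--     occupied = [s for s in spots if s in positions]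
--     return occupied == spots[len(spots) - len(occupied):] and all(
--         positions[s] == species for s in occupied)
-- ===== Notes on version B (the rewrite author's own statement) =====
-- stated objective: simpler
-- what changed: Replaces the stateful 'validating'-flag scan with early returns by a declarative check: collect the occupied spots of the sorted room and test that they equal the suffix of the sorted room of the same length and all carry the right species.
import Mathlib
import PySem

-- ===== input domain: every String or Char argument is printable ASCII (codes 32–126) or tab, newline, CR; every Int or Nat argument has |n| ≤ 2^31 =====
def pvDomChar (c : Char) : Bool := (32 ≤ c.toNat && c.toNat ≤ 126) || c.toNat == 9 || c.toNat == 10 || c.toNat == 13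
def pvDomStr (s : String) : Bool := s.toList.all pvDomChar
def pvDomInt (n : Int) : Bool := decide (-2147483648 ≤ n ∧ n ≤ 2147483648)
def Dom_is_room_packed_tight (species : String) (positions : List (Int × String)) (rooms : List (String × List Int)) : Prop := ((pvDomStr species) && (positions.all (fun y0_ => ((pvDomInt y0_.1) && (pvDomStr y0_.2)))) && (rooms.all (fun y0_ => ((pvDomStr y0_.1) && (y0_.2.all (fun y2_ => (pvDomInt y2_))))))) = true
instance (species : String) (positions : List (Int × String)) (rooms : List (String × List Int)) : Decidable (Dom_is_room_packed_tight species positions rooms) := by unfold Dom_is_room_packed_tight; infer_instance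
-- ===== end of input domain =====

-- B replaces A's stateful 'validating'-flag scan (with early returns) by a declarative
-- collect-then-verify check (occupied spots = suffix of sorted room, all correct species); objective: simpler.

-- ===== PORT A =====
-- shared dict primitives (association list, first match): 'k in d' and 'd[k]'
def pvDictContains (d : List (Int × String)) (k : Int) : Bool :=
  d.any (fun p => p.1 == k)
def pvDictGet? (d : List (Int × String)) (k : Int) : Option String :=
  (d.find? (fun p => p.1 == k)).map Prod.snd
def pvRoomsGet? (d : List (String × List Int)) (k : String) : Option (List Int) :=
  (d.find? (fun p => p.1 == k)).map Prod.snd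

def is_occupied (position : Int) (positions : List (Int × String)) : Bool :=
  pvDictContains positions position

-- the for-loop of A with its 'validating' flag and early returns
def pvLoopA (species : String) (positions : List (Int × String)) :
    List Int → Bool → Bool
  | [], _ => true
  | spot :: rest, validating =>
    let v := if is_occupied spot positions then true else validating
    if v = false then pvLoopA species positions rest v
    else if is_occupied spot positions = false then false
    -- positions[spot] != species: here the spot is occupied, so get? is some;
    -- 'get? ≠ some species' is exactly Python's comparison (no KeyError possible)
    else if pvDictGet? positions spot != some species then false
    else pvLoopA species positions rest v

def is_room_packed_tight (species : String) (positions : List (Int × String)) (rooms : List (String × List Int)) : Bool :=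
  match pvRoomsGet? rooms species with
  | none => false   -- KeyError rooms[species]; excluded by Pre_
  | some room => pvLoopA species positions (PySem.List.sorted room (fun x => x) false) false

-- ===== PORT B =====
def is_room_packed_tight_alt (species : String) (positions : List (Int × String)) (rooms : List (String × List Int)) : Bool :=
  match pvRoomsGet? rooms species with
  | none => false   -- KeyError rooms[species]; excluded by Pre_
  | some room =>
    let spots := PySem.List.sorted room (fun x => x) false
    let occupied := spots.filter (fun s => pvDictContains positions s)
    (occupied == PySem.List.slice spots (some ((spots.length : Int) - (occupied.length : Int))) none)
      && occupied.all (fun s => pvDictGet? positions s == some species)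

-- ===== PRECONDITION & SPEC =====
-- Pre_ excludes exactly the inputs where A raises KeyError: species not a key of rooms.
def Pre_is_room_packed_tight (species : String) (positions : List (Int × String)) (rooms : List (String × List Int)) : Prop :=
  species ∈ rooms.map Prod.fst
instance (species : String) (positions : List (Int × String)) (rooms : List (String × List Int)) : Decidable (Pre_is_room_packed_tight species positions rooms) := by unfold Pre_is_room_packed_tight; infer_instance

def pvWitness_is_room_packed_tight : String × (List (Int × String)) × (List (String × List Int)) :=
  ("A", [(0, "A")], [("A", [0, 1]), ("B", [2])])

def Spec_is_room_packed_tight (species : String) (positions : List (Int × String)) (rooms : List (String × List Int)) (out : Bool) : Prop := out = is_room_packed_tight_alt species positions rooms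
instance (species : String) (positions : List (Int × String)) (rooms : List (String × List Int)) (out : Bool) : Decidable (Spec_is_room_packed_tight species positions rooms out) := by unfold Spec_is_room_packed_tight; infer_instance

-- ===== CLAIM (what is proved, stated in full; the proofs are below) =====
def Claim_equal_is_room_packed_tight : Prop := ∀ (species : String) (positions : List (Int × String)) (rooms : List (String × List Int)), Dom_is_room_packed_tight species positions rooms → Pre_is_room_packed_tight species positions rooms → Spec_is_room_packed_tight species positions rooms (is_room_packed_tight species positions rooms)

-- ===== LEMMAS AND PROOFS =====

-- with validating = True the loop just demands every remaining spot occupied and correct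
theorem pvLoopA_true (species : String) (positions : List (Int × String)) (l : List Int) :
    pvLoopA species positions l true
      = l.all (fun s => pvDictContains positions s && (pvDictGet? positions s == some species)) := by
  induction l with
  | nil => rfl
  | cons s rest ih =>
    by_cases h : pvDictContains positions s
    · by_cases hc : pvDictGet? positions s = some species
      · simp [pvLoopA, is_occupied, h, hc, ih]
      · simp [pvLoopA, is_occupied, h, hc]
    · simp [pvLoopA, is_occupied, h]

-- a list all of whose members are occupied: the combined test collapses
theorem all_and_of_all_occ (positions : List (Int × String)) (species : String) (l : List Int)
    (h : l.all (fun s => pvDictContains positions s) = true) :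
    l.all (fun s => pvDictContains positions s && (pvDictGet? positions s == some species))
      = l.all (fun s => pvDictGet? positions s == some species) := by
  induction l with
  | nil => rfl
  | cons x rest ih =>
    simp only [List.all_cons, Bool.and_eq_true] at h ⊢
    rw [h.1, ih h.2]
    simp

-- if every element of l is occupied then filter keeps l
theorem filter_eq_self_of_all (positions : List (Int × String)) (l : List Int)
    (h : l.all (fun s => pvDictContains positions s) = true) :
    l.filter (fun s => pvDictContains positions s) = l :=
  List.filter_eq_self.mpr (by intro a ha; exact (List.all_eq_true.mp h) a ha)

-- the key impossibility: if not all of rest is occupied, the occupied spots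
-- (with an occupied head s prepended) cannot equal the matching suffix of rest
theorem suffix_ne (positions : List (Int × String)) (s : Int) (rest : List Int)
    (hs : pvDictContains positions s = true)
    (hrest : rest.all (fun x => pvDictContains positions x) = false) :
    (s :: rest.filter (fun x => pvDictContains positions x))
      ≠ rest.drop (rest.length - (rest.filter (fun x => pvDictContains positions x)).length - 1) := by
  intro heq
  set occ : Int → Bool := fun x => pvDictContains positions x with hocc
  set fr := rest.filter occ with hfr
  have hlt : fr.length < rest.length := by
    rcases List.all_eq_false.mp hrest with ⟨x, hx, hxo⟩
    exact List.length_filter_lt_length_iff_exists.mpr ⟨x, hx, hxo⟩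
  set m := rest.length - fr.length - 1 with hm
  -- every element of the drop is occupied
  have hdropocc : ∀ x ∈ rest.drop m, occ x = true := by
    intro x hx
    rw [← heq] at hx
    rcases List.mem_cons.mp hx with h1 | h2
    · subst h1; exact hs
    · exact (List.mem_filter.mp h2).2
  have hfd : (rest.drop m).filter occ = rest.drop m := List.filter_eq_self.mpr hdropocc
  have hlen : (rest.drop m).length = fr.length + 1 := by
    rw [← heq]; simp
  have hsplit : rest.filter occ = (rest.take m).filter occ ++ (rest.drop m).filter occ := by
    rw [← List.filter_append, List.take_append_drop]
  have : fr.length ≥ fr.length + 1 := by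
    calc fr.length = ((rest.take m).filter occ).length + ((rest.drop m).filter occ).length := by
            rw [hfr, hsplit]; simp
      _ ≥ ((rest.drop m).filter occ).length := by omega
      _ = fr.length + 1 := by rw [hfd, hlen]
  omega

-- main loop characterisation: A's flag loop from False = B's suffix-and-species check
theorem pvLoopA_false (species : String) (positions : List (Int × String)) (l : List Int) :
    pvLoopA species positions l false
      = ((l.filter (fun s => pvDictContains positions s)
            == l.drop (l.length - (l.filter (fun s => pvDictContains positions s)).length))
         && (l.filter (fun s => pvDictContains positions s)).all
              (fun s => pvDictGet? positions s == some species)) := by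
  induction l with
  | nil => rfl
  | cons s rest ih =>
    set occ : Int → Bool := fun x => pvDictContains positions x with hocc
    have hle : (rest.filter occ).length ≤ rest.length := List.length_filter_le _ _
    by_cases h : occ s
    · -- head occupied: loop switches to validating mode
      have hA : pvLoopA species positions (s :: rest) false
          = (if pvDictGet? positions s != some species then false
             else pvLoopA species positions rest true) := by
        simp [pvLoopA, is_occupied, hocc] at h ⊢
        simp [h]
      rw [hA, pvLoopA_true]
      have hfc : (s :: rest).filter occ = s :: rest.filter occ := by
        simp [h]
      by_cases hall : rest.all occ
      · -- all of rest occupied: suffix is the whole list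
        have hfr : rest.filter occ = rest := filter_eq_self_of_all positions rest hall
        rw [hfc, hfr]
        have hdrop : (s :: rest).drop ((s :: rest).length - (s :: rest).length) = s :: rest := by
          simp
        simp only [List.length_cons]
        rw [all_and_of_all_occ positions species rest hall]
        by_cases hc : pvDictGet? positions s = some species
        · simp [hc]
        · simp [hc]
      · -- some of rest unoccupied: both sides false
        have hA0 : rest.all (fun x => occ x && (pvDictGet? positions x == some species)) = false := by
          rcases List.all_eq_false.mp (by simpa using hall) with ⟨x, hx, hxo⟩
          apply List.all_eq_false.mpr
          exact ⟨x, hx, by simp [hxo]⟩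
        have hlt : (rest.filter occ).length < rest.length :=
          List.length_filter_lt_length_iff_exists.mpr (by
            rcases List.all_eq_false.mp (by simpa using hall) with ⟨x, hx, hxo⟩
            exact ⟨x, hx, hxo⟩)
        have hne := suffix_ne positions s rest (by simpa [hocc] using h) (by simpa using hall)
        have hdrop : (s :: rest).drop ((s :: rest).length - ((s :: rest).filter occ).length)
            = rest.drop (rest.length - (rest.filter occ).length - 1) := by
          rw [hfc]
          simp only [List.length_cons]
          rw [show rest.length + 1 - ((rest.filter occ).length + 1)
                = (rest.length - (rest.filter occ).length - 1) + 1 from by omega]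
          exact List.drop_succ_cons
        rw [hdrop, hfc]
        have hbeq : ((s :: rest.filter occ) == rest.drop (rest.length - (rest.filter occ).length - 1)) = false := by
          apply beq_eq_false_iff_ne.mpr
          exact hne
        rw [hA0, hbeq]
        simp
    · -- head unoccupied: loop continues, filter and suffix unchanged
      have hA : pvLoopA species positions (s :: rest) false = pvLoopA species positions rest false := by
        simp [pvLoopA, is_occupied, hocc] at h ⊢
        simp [h]
      have hfc : (s :: rest).filter occ = rest.filter occ := by
        simp [h]
      have hdrop : List.drop ((s :: rest).length - (rest.filter occ).length) (s :: rest)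
          = rest.drop (rest.length - (rest.filter occ).length) := by
        simp only [List.length_cons]
        rw [show rest.length + 1 - (rest.filter occ).length
              = (rest.length - (rest.filter occ).length) + 1 from by omega]
        exact List.drop_succ_cons
      rw [hA, ih, hfc, hdrop]

-- ===== VERDICT (by name: the statement is the Claim_ definition above) =====
theorem is_room_packed_tight_spec : Claim_equal_is_room_packed_tight := by
  intro species positions rooms _hdom _hpre
  unfold Spec_is_room_packed_tight is_room_packed_tight is_room_packed_tight_alt
  cases hr : pvRoomsGet? rooms species with
  | none => rfl
  | some room =>
    simp only []
    set spots := PySem.List.sorted room (fun x => x) false with hspots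
    set occ : Int → Bool := fun x => pvDictContains positions x with hocc
    have hle : (spots.filter occ).length ≤ spots.length := List.length_filter_le _ _
    have hslice : PySem.List.slice spots (some ((spots.length : Int) - ((spots.filter occ).length : Int))) none
        = spots.drop (spots.length - (spots.filter occ).length) := by
      rw [PySem.List.slice_from spots (by omega : (0:Int) ≤ (spots.length : Int) - ((spots.filter occ).length : Int))]
      congr 1
      omega
    rw [hslice]
    exact pvLoopA_false species positions spots
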